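-- pv_equiv track=rewrite | github.com/Johanypf/Python | Practice/Retos/reto9.py | producto_mas_barato
-- ===== SOURCE A (Python) =====
-- def producto_mas_barato(catalogo:dict)->str:
--     if not catalogo:
--         return ("No hay productos para escoger")
--
--     menor_precio = min(catalogo.values())
--
--     if menor_precio > 10000:
--         return None
--     else:
--         lista_products = []
--         for i,y in catalogo.items():
--             if y == menor_precio:
--                 lista_products.append(i)
--
--     new_list = sorted(lista_products)
--     return new_list[0]
-- ===== SOURCE B (Python) =====
-- def producto_mas_barato(catalogo: dict) -> str:
--     # Single accumulating pass instead of min + filter + sort.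
--     if not catalogo:
--         return ("No hay productos para escoger")
--     best_name = None
--     best_price = None
--     for name, price in catalogo.items():
--         if best_price is None or price < best_price:
--             best_name, best_price = name, price
--         elif price == best_price and name < best_name:
--             best_name = name
--     if best_price > 10000:
--         return None
--     return best_name
-- ===== Notes on version B (the rewrite author's own statement) =====
-- stated objective: alternative
-- what changed: Replaces A's min-over-values then filter-matching-names then sort-and-take-head pipeline (three passes plus a sort) by one accumulating pass that keeps the lowest price seen and the alphabetically smallest name at that price.
import Mathlib
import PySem

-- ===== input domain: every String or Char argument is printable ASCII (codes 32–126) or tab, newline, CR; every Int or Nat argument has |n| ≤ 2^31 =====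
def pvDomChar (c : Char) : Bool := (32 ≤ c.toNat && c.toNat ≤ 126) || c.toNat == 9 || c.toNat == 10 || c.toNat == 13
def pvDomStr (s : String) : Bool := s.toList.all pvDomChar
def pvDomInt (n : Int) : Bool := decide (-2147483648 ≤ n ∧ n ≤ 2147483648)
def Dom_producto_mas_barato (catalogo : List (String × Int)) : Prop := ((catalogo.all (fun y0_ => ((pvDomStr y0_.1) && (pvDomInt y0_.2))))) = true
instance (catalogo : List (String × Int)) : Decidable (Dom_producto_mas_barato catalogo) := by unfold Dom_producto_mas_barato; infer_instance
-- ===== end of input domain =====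

-- B replaces A's min-then-filter-then-sort pipeline by one accumulating pass over the items
-- (lowest price seen + alphabetically smallest name at that price); same result, different decomposition.


-- ===== PORT A =====
-- transliteration of A: empty guard, menor = min(values), threshold, filter loop, sorted, [0]
def producto_mas_barato (catalogo : List (String × Int)) : Option String :=
  let d := PySem.Dict.ofList catalogo
  if d.items.isEmpty then some "No hay productos para escoger"
  else
    match PySem.List.min? d.values (fun v => v) with
    | none => none   -- unreachable: values is nonempty here (min of empty would raise)
    | some menor =>
      if menor > 10000 then none
      else
        let lista_products := d.items.foldl
          (fun acc p => if p.2 = menor then acc ++ [p.1] else acc) ([] : List String)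
        let new_list := PySem.List.sorted lista_products (fun x => x) false
        PySem.List.pyGet? new_list 0

-- ===== PORT B =====
-- B's loop body: strictly lower price resets both, equal price keeps the smaller name
def stepB (b p : String × Int) : String × Int :=
  if p.2 < b.2 then (p.1, p.2)
  else if p.2 = b.2 ∧ p.1 < b.1 then (p.1, b.2)
  else b

def producto_mas_barato_alt (catalogo : List (String × Int)) : Option String :=
  match (PySem.Dict.ofList catalogo).items with
  | [] => some "No hay productos para escoger"
  | x :: rest =>
    let b := rest.foldl stepB x
    if b.2 > 10000 then none else some b.1

-- ===== PRECONDITION & SPEC =====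
def Spec_producto_mas_barato (catalogo : List (String × Int)) (out : Option String) : Prop := out = producto_mas_barato_alt catalogo
instance (catalogo : List (String × Int)) (out : Option String) : Decidable (Spec_producto_mas_barato catalogo out) := by unfold Spec_producto_mas_barato; infer_instance

-- ===== CLAIM (what is proved, stated in full; the proofs are below) =====
def Claim_equal_producto_mas_barato : Prop := ∀ (catalogo : List (String × Int)), Dom_producto_mas_barato catalogo → Spec_producto_mas_barato catalogo (producto_mas_barato catalogo)

-- ===== LEMMAS AND PROOFS =====

-- invariant of B's fold: the accumulator is (a pair of the list or the start), its price is
-- minimal, and its name is minimal among entries carrying that price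
theorem foldB_inv (l : List (String × Int)) (b : String × Int) :
    (l.foldl stepB b = b ∨ l.foldl stepB b ∈ l) ∧
    (l.foldl stepB b).2 ≤ b.2 ∧
    (∀ p ∈ l, (l.foldl stepB b).2 ≤ p.2) ∧
    ((l.foldl stepB b).2 = b.2 → (l.foldl stepB b).1 ≤ b.1) ∧
    (∀ p ∈ l, (l.foldl stepB b).2 = p.2 → (l.foldl stepB b).1 ≤ p.1) := by
  induction l generalizing b with
  | nil => simp
  | cons p t ih =>
    simp only [List.foldl_cons]
    obtain ⟨hmem, hle, hall, hname, hnames⟩ := ih (stepB b p)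
    have hb : (stepB b p = b ∨ stepB b p = p) ∧ (stepB b p).2 ≤ b.2 ∧ (stepB b p).2 ≤ p.2 ∧
        ((stepB b p).2 = b.2 → (stepB b p).1 ≤ b.1) ∧ ((stepB b p).2 = p.2 → (stepB b p).1 ≤ p.1) := by
      unfold stepB
      split_ifs with hlt htie
      · refine ⟨Or.inr rfl, le_of_lt hlt, le_refl _, fun h => ?_, fun _ => le_refl _⟩
        simp only at h; omega
      · refine ⟨Or.inr (by rw [← htie.1]), le_refl _, le_of_eq htie.1.symm,
          fun _ => le_of_lt htie.2, fun _ => le_refl _⟩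
      · refine ⟨Or.inl rfl, le_refl _, by omega, fun _ => le_refl _, fun h => ?_⟩
        by_cases hbp : p.1 < b.1
        · exact absurd ⟨h.symm, hbp⟩ htie
        · exact not_lt.mp hbp
    obtain ⟨hb1, hb2, hb3, hb4, hb5⟩ := hb
    refine ⟨?_, le_trans hle hb2, ?_, ?_, ?_⟩
    · rcases hmem with h | h
      · rcases hb1 with h' | h'
        · exact Or.inl (h.trans h')
        · rw [h, h']; exact Or.inr List.mem_cons_self
      · exact Or.inr (List.mem_cons_of_mem _ h)
    · intro q hq
      rcases List.mem_cons.mp hq with h | h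
      · subst h; exact le_trans hle hb3
      · exact hall q h
    · intro h
      have h1 : (List.foldl stepB (stepB b p) t).2 = (stepB b p).2 := by omega
      have h2 : (stepB b p).2 = b.2 := by omega
      exact le_trans (hname h1) (hb4 h2)
    · intro q hq h
      rcases List.mem_cons.mp hq with h' | h'
      · have hq2 : q.2 = p.2 := by rw [h']
        have h1 : (List.foldl stepB (stepB b p) t).2 = (stepB b p).2 := by omega
        have h2 : (stepB b p).2 = p.2 := by omega
        rw [h']
        exact le_trans (hname h1) (hb5 h2)
      · exact hnames q h' h

theorem core (l : List (String × Int)) :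
    (if l.isEmpty then some "No hay productos para escoger"
     else
       match PySem.List.min? (l.map (·.2)) (fun v => v) with
       | none => (none : Option String)
       | some menor =>
         if menor > 10000 then none
         else
           PySem.List.pyGet?
             (PySem.List.sorted
               (l.foldl (fun acc p => if p.2 = menor then acc ++ [p.1] else acc) ([] : List String))
               (fun x => x) false) 0)
    = (match l with
       | [] => some "No hay productos para escoger"
       | x :: rest =>
         let b := rest.foldl stepB x
         if b.2 > 10000 then none else some b.1) := by
  cases l with
  | nil => rfl
  | cons x rest =>
    simp only [List.isEmpty_cons, if_neg (by simp : ¬ (false = true)), List.map_cons,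
      PySem.List.min?_id_cons]
    obtain ⟨hmem, hle, hall, hname, hnames⟩ := foldB_inv rest x
    set r := rest.foldl stepB x with hr
    set m := (rest.map (·.2)).foldl min x.2 with hm
    have hmin : PySem.List.min? (x.2 :: rest.map (·.2)) (fun y => y) = some m :=
      PySem.List.min?_id_cons x.2 (rest.map (·.2))
    have hrmem : r ∈ x :: rest := by
      rcases hmem with h | h
      · exact h ▸ List.mem_cons_self
      · exact List.mem_cons_of_mem _ h
    have hrm : r.2 = m := by
      have h1 : m ≤ r.2 := PySem.List.min?_isMin hmin r.2
        (by rcases List.mem_cons.mp hrmem with h | h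
            · exact h ▸ List.mem_cons_self
            · exact List.mem_cons_of_mem _ (List.mem_map_of_mem h))
      have h2 : r.2 ≤ m := by
        rcases List.mem_cons.mp (PySem.List.min?_mem hmin) with h | h
        · exact h ▸ hle
        · obtain ⟨q, hq, hq2⟩ := List.mem_map.mp h
          exact hq2 ▸ hall q hq
      omega
    rw [← hrm]
    by_cases hth : r.2 > 10000
    · simp [hth]
    · simp only [if_neg hth]
      have hfold : (List.foldl (fun (acc : List String) (p : String × Int) =>
          if p.2 = r.2 then acc ++ [p.1] else acc) [] (x :: rest))
          = ((x :: rest).filter (fun (q : String × Int) => decide (q.2 = r.2))).map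
              (fun (q : String × Int) => q.1) := by
        have hcongr : (fun (acc : List String) (p : String × Int) =>
            if p.2 = r.2 then acc ++ [p.1] else acc)
            = (fun acc p => if (fun (q : String × Int) => decide (q.2 = r.2)) p = true
                then acc ++ [(fun (q : String × Int) => q.1) p] else acc) := by
          funext acc p; simp
        rw [hcongr, PySem.List.foldl_append_if]; simp
      rw [hfold]
      set names := ((x :: rest).filter (fun (q : String × Int) => decide (q.2 = r.2))).map
        (fun (q : String × Int) => q.1) with hnamesdef
      have hr_in : r.1 ∈ names :=
        List.mem_map_of_mem (List.mem_filter.mpr ⟨hrmem, by simp⟩)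
      have hne : names ≠ [] := fun h => by simp [h] at hr_in
      cases hsort : PySem.List.sorted names (fun y => y) false with
      | nil => exact absurd ((PySem.List.sorted_eq_nil_iff _ _ _).mp hsort) hne
      | cons s t =>
        have hs_mem : s ∈ names :=
          (PySem.List.sorted_perm names (fun y => y) false).mem_iff.mp (hsort ▸ List.mem_cons_self)
        have hle_s : r.1 ≤ s := by
          obtain ⟨q, hq, hq1⟩ := List.mem_map.mp hs_mem
          obtain ⟨hqmem, hqf⟩ := List.mem_filter.mp hq
          have hq2 : q.2 = r.2 := by simpa using hqf
          rcases List.mem_cons.mp hqmem with h | h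
          · exact hq1 ▸ h ▸ hname (h ▸ hq2.symm)
          · exact hq1 ▸ hnames q h hq2.symm
        have hs_le : s ≤ r.1 := PySem.List.key_head_sorted_le names (fun y => y) hsort r.1 hr_in
        have : s = r.1 := le_antisymm hs_le hle_s
        simp [PySem.List.pyGet?, PySem.List.pyIdx?, this]

-- ===== VERDICT (by name: the statement is the Claim_ definition above) =====
theorem producto_mas_barato_spec : Claim_equal_producto_mas_barato := by
  intro catalogo _
  unfold Spec_producto_mas_barato producto_mas_barato producto_mas_barato_alt
  simp only [PySem.Dict.values]
  exact core ((PySem.Dict.ofList catalogo).items)
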